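-- pv_equiv track=rewrite | github.com/conao3/coder | contests/atcoder/abc179/abc179_b/main.py | solve
-- ===== SOURCE A (Python) =====
-- def solve(n, dlist):
--     flag=False
--     c = 0
--     for d in dlist:
--         if d[0]==d[1]:
--             c = c+1
--         else:
--             if c>=3:
--                 return True
--             c=0
--
--     return c>=3
-- ===== SOURCE B (Python) =====
-- def solve(n, dlist):
--     return '111' in ''.join('1' if a == b else '0' for a, b in dlist)
-- ===== Notes on version B (the rewrite author's own statement) =====
-- stated objective: idiomatic
-- what changed: Replaces the manual counter/reset/early-return scan with a map to a '0'/'1' doublet-flag string followed by a '111' substring test.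
import Mathlib
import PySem

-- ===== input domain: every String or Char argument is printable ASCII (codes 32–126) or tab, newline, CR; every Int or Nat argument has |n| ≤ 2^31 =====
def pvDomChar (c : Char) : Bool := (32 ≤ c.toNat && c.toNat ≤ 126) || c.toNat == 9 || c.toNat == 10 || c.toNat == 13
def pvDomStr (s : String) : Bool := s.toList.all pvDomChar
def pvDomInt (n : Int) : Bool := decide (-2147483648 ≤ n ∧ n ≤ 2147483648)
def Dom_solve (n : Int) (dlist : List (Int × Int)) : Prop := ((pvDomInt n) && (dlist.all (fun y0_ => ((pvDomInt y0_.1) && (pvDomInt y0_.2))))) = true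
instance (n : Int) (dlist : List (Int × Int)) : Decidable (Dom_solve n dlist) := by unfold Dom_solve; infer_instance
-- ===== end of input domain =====

-- B replaces A's counter/reset/early-return scan by a doublet-flag string and a '111' substring test (idiomatic; same cost).

-- ===== PORT A =====
-- the for-loop with its running counter c and the early 'return True'
def solveLoopA (c : Int) (l : List (Int × Int)) : Bool :=
  match l with
  | [] => decide (3 ≤ c)              -- final 'return c>=3'
  | d :: rest =>
      if d.1 == d.2 then solveLoopA (c + 1) rest
      else if decide (3 ≤ c) then true else solveLoopA 0 rest

def solve (n : Int) (dlist : List (Int × Int)) : Bool :=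
  solveLoopA 0 dlist

-- ===== PORT B =====
-- ''.join('1' if a==b else '0' for a,b in dlist), then '111' in it
def solve_alt (n : Int) (dlist : List (Int × Int)) : Bool :=
  PySem.Str.isIn "111" (String.ofList (dlist.map (fun d => if d.1 == d.2 then '1' else '0')))

-- ===== PRECONDITION & SPEC =====
def Spec_solve (n : Int) (dlist : List (Int × Int)) (out : Bool) : Prop := out = solve_alt n dlist
instance (n : Int) (dlist : List (Int × Int)) (out : Bool) : Decidable (Spec_solve n dlist out) := by unfold Spec_solve; infer_instance

-- ===== CLAIM (what is proved, stated in full; the proofs are below) =====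
def Claim_equal_solve : Prop := ∀ (n : Int) (dlist : List (Int × Int)), Dom_solve n dlist → Spec_solve n dlist (solve n dlist)

-- ===== LEMMAS AND PROOFS =====

def pvFlags (l : List (Int × Int)) : List Char :=
  l.map (fun d => if d.1 == d.2 then '1' else '0')

-- with c ≥ 3, '111' is a prefix of a block of c ones
lemma prefix_ones (c : Nat) (h : 3 ≤ c) : (['1','1','1'] <+: List.replicate c '1') := by
  obtain ⟨k, rfl⟩ : ∃ k, c = 3 + k := ⟨c - 3, by omega⟩
  rw [List.replicate_add]
  exact List.prefix_append _ _

-- '111' occurs in a block of c ones exactly when c ≥ 3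
lemma infix_replicate_one (c : Nat) :
    (['1','1','1'] <:+: List.replicate c '1') ↔ 3 ≤ c := by
  constructor
  · intro h
    simpa using h.sublist.length_le
  · intro h
    exact (prefix_ones c h).isInfix

-- the key split: an occurrence of '111' in  1^c ++ '0' :: t  lies in the block or in t
lemma infix_split (c : Nat) (t : List Char) :
    (['1','1','1'] <:+: List.replicate c '1' ++ '0' :: t) ↔ 3 ≤ c ∨ ['1','1','1'] <:+: t := by
  induction c generalizing t with
  | zero =>
      simp only [List.replicate, List.nil_append]
      rw [List.infix_cons_iff]
      constructor
      · rintro (h | h)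
        · rcases h with ⟨s, hs⟩; simp at hs
        · exact Or.inr h
      · rintro (h | h)
        · omega
        · exact Or.inr h
  | succ c ih =>
      rw [List.replicate_succ, List.cons_append, List.infix_cons_iff]
      constructor
      · rintro (h | h)
        · left
          -- '111' a prefix of '1' :: 1^c ++ '0' :: t forces c ≥ 2
          rcases h with ⟨s, hs⟩
          match c, hs with
          | 0, hs => simp at hs
          | 1, hs => simp [List.replicate] at hs
          | (k+2), hs => omega
        · rcases (ih t).1 h with h3 | ht
          · exact Or.inl (by omega)
          · exact Or.inr ht
      · rintro (h | h)
        · left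
          have h1 := prefix_ones (c+1) h
          have he : ('1' :: (List.replicate c '1' ++ '0' :: t))
              = List.replicate (c+1) '1' ++ '0' :: t := by
            simp [List.replicate_succ]
          rw [he]
          exact h1.trans (List.prefix_append _ _)
        · exact Or.inr ((ih t).2 (Or.inr h))

-- A's loop computes exactly "1^c ++ flags l contains '111'"
lemma solveLoopA_eq (l : List (Int × Int)) (c : Nat) :
    solveLoopA (c : Int) l = decide (['1','1','1'] <:+: List.replicate c '1' ++ pvFlags l) := by
  induction l generalizing c with
  | nil =>
      simp only [solveLoopA, pvFlags, List.map_nil, List.append_nil]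
      simp [infix_replicate_one c]
  | cons d rest ih =>
      simp only [solveLoopA, pvFlags, List.map_cons]
      by_cases hd : d.1 == d.2
      · simp only [hd, if_true]
        have : List.replicate c '1' ++ '1' :: List.map (fun d => if d.1 == d.2 then '1' else '0') rest
             = List.replicate (c + 1) '1' ++ pvFlags rest := by
          simp [List.replicate_succ', pvFlags, List.append_assoc]
        rw [this]
        have := ih (c + 1)
        simpa [pvFlags] using this
      · simp only [if_neg hd]
        simp only [infix_split]
        by_cases hc : 3 ≤ c
        · simp [hc, show 3 ≤ (c : Int) by exact_mod_cast hc]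
        · have h3 : ¬ 3 ≤ (c : Int) := by exact_mod_cast hc
          have h0 := ih 0
          simp only [Nat.cast_zero, List.replicate, List.nil_append] at h0
          simp [h3, hc, h0, pvFlags]

lemma solve_alt_eq (n : Int) (l : List (Int × Int)) :
    solve_alt n l = decide (['1','1','1'] <:+: pvFlags l) := by
  unfold solve_alt
  cases h : PySem.Str.isIn "111" (String.ofList (l.map (fun d => if d.1 == d.2 then '1' else '0')))
  · rw [PySem.Str.isIn_eq] at h
    have := (PySem.Chars.isIn_eq_false_iff _ _).1 (by simpa [pvFlags] using h)
    simp only [pvFlags]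
    simpa using (decide_eq_false this).symm
  · rw [PySem.Str.isIn_eq] at h
    have := (PySem.Chars.isIn_iff_infix _ _).1 (by simpa [pvFlags] using h)
    simp only [pvFlags]
    simpa using (decide_eq_true this).symm

-- ===== VERDICT (by name: the statement is the Claim_ definition above) =====
theorem solve_spec : Claim_equal_solve := by
  intro n dlist _
  unfold Spec_solve solve
  rw [solve_alt_eq]
  have := solveLoopA_eq dlist 0
  simpa using this
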